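-- pv_equiv track=rewrite | github.com/rcook0/DP | dp_compendium/digit_dp_no_adjacent_zeros.py | count_no_adjacent_zeros
-- ===== SOURCE A (Python) =====
-- from functools import lru_cache
--
-- def count_no_adjacent_zeros(N):
--     digs=list(map(int,str(N))); n=len(digs)
--     @lru_cache(None)
--     def dp(pos,tight,prev_zero,started):
--         if pos==n: return 1
--         limit=digs[pos] if tight else 9
--         tot=0
--         for d in range(limit+1):
--             ns = started or d!=0
--             if ns and prev_zero and d==0:
--                 continue
--             tot += dp(pos+1, tight and d==limit, ns and d==0, ns)
--         return tot
--     return dp(0, True, False, False)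
-- ===== SOURCE B (Python) =====
-- def count_no_adjacent_zeros(N):
--     digs = list(map(int, str(N)))
--     # Bottom-up over suffixes of the digit string, right to left, with six scalar
--     # accumulators instead of memoized recursion with an explicit digit loop:
--     #   a = completions of the current suffix length that are started, previous digit nonzero
--     #   b = started, previous digit zero
--     #   u = not yet started
--     #   tff/tft/ttt = count of valid numbers obtainable by completing the tight
--     #   (exact-prefix-of-N) path entering this suffix with state
--     #   (prev_zero, started) = (F,F) / (F,T) / (T,T), including N's own suffix if valid.
--     a = b = u = 1
--     tff = tft = ttt = 1
--     for L in reversed(digs):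
--         k = max(L - 1, 0) * a
--         ntff = (u if L >= 1 else 0) + k + (tff if L == 0 else tft)
--         ntft = (b if L >= 1 else 0) + k + (ttt if L == 0 else tft)
--         nttt = k + (0 if L == 0 else tft)
--         a, b, u = b + 9 * a, 9 * a, u + 9 * a
--         tff, tft, ttt = ntff, ntft, nttt
--     return tff
-- ===== Notes on version B (the rewrite author's own statement) =====
-- stated objective: alternative
-- what changed: Replaces the memoized top-down digit DP (recursion over positions with a 0..limit loop per position) by a single right-to-left pass over the digits carrying six scalar accumulators: free-completion counts per (prev_zero,started) state plus tight-path counts per entering state, with the inner digit loop collapsed into closed-form sums.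
import Mathlib
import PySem

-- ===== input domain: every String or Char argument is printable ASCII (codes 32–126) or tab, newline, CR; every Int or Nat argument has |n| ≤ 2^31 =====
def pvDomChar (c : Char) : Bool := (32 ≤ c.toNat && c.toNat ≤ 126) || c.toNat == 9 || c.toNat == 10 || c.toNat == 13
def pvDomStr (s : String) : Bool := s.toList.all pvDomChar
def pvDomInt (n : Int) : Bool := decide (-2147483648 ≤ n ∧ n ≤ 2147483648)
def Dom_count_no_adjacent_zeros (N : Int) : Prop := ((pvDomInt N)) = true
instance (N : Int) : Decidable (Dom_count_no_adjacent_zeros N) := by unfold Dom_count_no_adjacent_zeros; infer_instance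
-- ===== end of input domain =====

-- B replaces A's memoized top-down digit DP by a single right-to-left pass over the digits
-- with six scalar accumulators (objective: alternative decomposition, same O(#digits) cost).

-- ===== PORT A =====
-- digs = list(map(int, str(N))); the .getD 0 default is unreachable under Pre_ (str(N)
-- of a nonnegative N consists of digit characters, each of which int() accepts).
def pvDigs (N : Int) : List Int :=
  (PySem.Int.toStr N).toList.map (fun c => (PySem.Int.ofStr? (String.ofList [c])).getD 0)

-- dp(pos, tight, prev_zero, started): lru_cache is ported as an explicit cache (an
-- association dict keyed like Python's memo table) threaded through the recursion;
-- the remaining digit suffix `rest` stands for digs[pos:].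
def pvDpM (rest : List Int) (pos : Nat) (tight pz st : Bool)
    (cache : PySem.Dict (Nat × Bool × Bool × Bool) Int) :
    Int × PySem.Dict (Nat × Bool × Bool × Bool) Int :=
  match cache.get? (pos, tight, pz, st) with
  | some v => (v, cache)
  | none =>
    match rest with
    | [] => (1, cache.insert (pos, tight, pz, st) 1)
    | x :: rest' =>
      let r := (PySem.List.pyRange 0 ((if tight then x else 9) + 1) 1).foldl
        (fun (acc : Int × PySem.Dict (Nat × Bool × Bool × Bool) Int) d =>
          if (st || (d != 0)) && pz && (d == 0) then acc
          else
            ((acc.1 + (pvDpM rest' (pos + 1) (tight && (d == (if tight then x else 9)))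
                ((st || (d != 0)) && (d == 0)) (st || (d != 0)) acc.2).1),
             (pvDpM rest' (pos + 1) (tight && (d == (if tight then x else 9)))
                ((st || (d != 0)) && (d == 0)) (st || (d != 0)) acc.2).2)) (0, cache)
      (r.1, r.2.insert (pos, tight, pz, st) r.1)


def count_no_adjacent_zeros (N : Int) : Int :=
  (pvDpM (pvDigs N) 0 true false false PySem.Dict.empty).1

-- ===== PORT B =====
-- state = (a, b, u, tff, tft, ttt) exactly as the six accumulators of Source B's loop
def pvStep (s : Int × Int × Int × Int × Int × Int) (L : Int) :
    Int × Int × Int × Int × Int × Int :=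
  let (a, b, u, tff, tft, ttt) := s
  let k := (max (L - 1) 0) * a
  let ntff := (if L ≥ 1 then u else 0) + k + (if L == 0 then tff else tft)
  let ntft := (if L ≥ 1 then b else 0) + k + (if L == 0 then ttt else tft)
  let nttt := k + (if L == 0 then 0 else tft)
  (b + 9 * a, 9 * a, u + 9 * a, ntff, ntft, nttt)

def count_no_adjacent_zeros_alt (N : Int) : Int :=
  ((((PySem.Int.toStr N).toList.map
      (fun c => (PySem.Int.ofStr? (String.ofList [c])).getD 0)).reverse.foldl
    pvStep (1, 1, 1, 1, 1, 1)).2.2.2.1)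

-- ===== PRECONDITION & SPEC =====
-- A raises ValueError on N < 0 (int('-') on the sign character); Pre_ excludes exactly those.
def Pre_count_no_adjacent_zeros (N : Int) : Prop := 0 ≤ N
instance (N : Int) : Decidable (Pre_count_no_adjacent_zeros N) := by
  unfold Pre_count_no_adjacent_zeros; infer_instance

def pvWitness_count_no_adjacent_zeros : Int := 105

def Spec_count_no_adjacent_zeros (N : Int) (out : Int) : Prop := out = count_no_adjacent_zeros_alt N
instance (N : Int) (out : Int) : Decidable (Spec_count_no_adjacent_zeros N out) := by
  unfold Spec_count_no_adjacent_zeros; infer_instance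

-- ===== CLAIM (what is proved, stated in full; the proofs are below) =====
def Claim_equal_count_no_adjacent_zeros : Prop := ∀ (N : Int), Dom_count_no_adjacent_zeros N → Pre_count_no_adjacent_zeros N → Spec_count_no_adjacent_zeros N (count_no_adjacent_zeros N)

-- ===== LEMMAS AND PROOFS =====

-- pure (memo-free) model of A's dp, used only by the proofs below
def pvDp : List Int → Bool → Bool → Bool → Int
  | [], _, _, _ => 1
  | x :: rest, tight, pz, st =>
    (PySem.List.pyRange 0 ((if tight then x else 9) + 1) 1).foldl
      (fun tot d =>
        if (st || (d != 0)) && pz && (d == 0) then tot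
        else tot + pvDp rest (tight && (d == (if tight then x else 9)))
          ((st || (d != 0)) && (d == 0)) (st || (d != 0))) 0


def pvValid (digs : List Int) (c : PySem.Dict (Nat × Bool × Bool × Bool) Int) : Prop :=
  ∀ p t z s v, c.get? (p, t, z, s) = some v → v = pvDp (digs.drop p) t z s


lemma pv_dpM_eq (digs : List Int) : ∀ (rest : List Int) (pos : Nat) (t z s : Bool)
    (c : PySem.Dict (Nat × Bool × Bool × Bool) Int),
    rest = digs.drop pos → pvValid digs c →
    (pvDpM rest pos t z s c).1 = pvDp rest t z s ∧ pvValid digs (pvDpM rest pos t z s c).2 := by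
  intro rest
  induction rest with
  | nil =>
    intro pos t z s c hrest hc
    rw [pvDpM]
    cases hg : c.get? (pos, t, z, s) with
    | some v =>
      refine ⟨?_, hc⟩
      have hv := hc pos t z s v hg
      rw [hv, ← hrest]
    | none =>
      refine ⟨by simp [pvDp], ?_⟩
      intro p' t' z' s' v' hv'
      rw [PySem.Dict.get?_insert] at hv'
      by_cases hk : (p', t', z', s') = (pos, t, z, s)
      · rw [if_pos hk] at hv'
        simp only [Prod.mk.injEq] at hk
        obtain ⟨rfl, rfl, rfl, rfl⟩ := hk
        have hv1 : v' = 1 := (Option.some.inj hv').symm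
        rw [hv1, ← hrest]
        simp [pvDp]
      · rw [if_neg hk] at hv'
        exact hc p' t' z' s' v' hv'
  | cons x rest' ih =>
    intro pos t z s c hrest hc
    have hrest' : rest' = digs.drop (pos + 1) := by
      rw [← List.tail_drop, ← hrest, List.tail_cons]
    rw [pvDpM]
    cases hg : c.get? (pos, t, z, s) with
    | some v =>
      refine ⟨?_, hc⟩
      have hv := hc pos t z s v hg
      rw [hv, ← hrest]
    | none =>
      have haux : ∀ (ds : List Int) (t0 : Int) (c0 : PySem.Dict (Nat × Bool × Bool × Bool) Int),
          pvValid digs c0 →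
          (ds.foldl (fun (acc : Int × PySem.Dict (Nat × Bool × Bool × Bool) Int) d =>
            if (s || (d != 0)) && z && (d == 0) then acc
            else
              ((acc.1 + (pvDpM rest' (pos + 1) (t && (d == (if t then x else 9)))
                  ((s || (d != 0)) && (d == 0)) (s || (d != 0)) acc.2).1),
               (pvDpM rest' (pos + 1) (t && (d == (if t then x else 9)))
                  ((s || (d != 0)) && (d == 0)) (s || (d != 0)) acc.2).2)) (t0, c0)).1
            = ds.foldl (fun tot d =>
                if (s || (d != 0)) && z && (d == 0) then tot
                else tot + pvDp rest' (t && (d == (if t then x else 9)))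
                  ((s || (d != 0)) && (d == 0)) (s || (d != 0))) t0
          ∧ pvValid digs (ds.foldl (fun (acc : Int × PySem.Dict (Nat × Bool × Bool × Bool) Int) d =>
            if (s || (d != 0)) && z && (d == 0) then acc
            else
              ((acc.1 + (pvDpM rest' (pos + 1) (t && (d == (if t then x else 9)))
                  ((s || (d != 0)) && (d == 0)) (s || (d != 0)) acc.2).1),
               (pvDpM rest' (pos + 1) (t && (d == (if t then x else 9)))
                  ((s || (d != 0)) && (d == 0)) (s || (d != 0)) acc.2).2)) (t0, c0)).2 := by
        intro ds
        induction ds with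
        | nil => intro t0 c0 hc0; exact ⟨rfl, hc0⟩
        | cons d ds ihd =>
          intro t0 c0 hc0
          simp only [List.foldl]
          by_cases hskip : ((s || (d != 0)) && z && (d == 0)) = true
          · rw [if_pos hskip, if_pos hskip]
            exact ihd t0 c0 hc0
          · rw [if_neg hskip, if_neg hskip]
            obtain ⟨h1, h2⟩ := ih (pos + 1) (t && (d == (if t then x else 9)))
              ((s || (d != 0)) && (d == 0)) (s || (d != 0)) c0 hrest' hc0
            obtain ⟨h3, h4⟩ := ihd (t0 + (pvDpM rest' (pos + 1) (t && (d == (if t then x else 9)))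
              ((s || (d != 0)) && (d == 0)) (s || (d != 0)) c0).1)
              ((pvDpM rest' (pos + 1) (t && (d == (if t then x else 9)))
              ((s || (d != 0)) && (d == 0)) (s || (d != 0)) c0).2) h2
            refine ⟨h3.trans ?_, h4⟩
            rw [h1]
      obtain ⟨h1, h2⟩ := haux (PySem.List.pyRange 0 ((if t then x else 9) + 1) 1) 0 c hc
      constructor
      · rw [h1]
        conv_rhs => rw [pvDp]
      · intro p' t' z' s' v' hv'
        simp only at hv'
        rw [PySem.Dict.get?_insert] at hv'
        by_cases hk : (p', t', z', s') = (pos, t, z, s)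
        · rw [if_pos hk] at hv'
          simp only [Prod.mk.injEq] at hk
          obtain ⟨rfl, rfl, rfl, rfl⟩ := hk
          have hv1 := (Option.some.inj hv').symm
          rw [hv1, h1, ← hrest]
          conv_rhs => rw [pvDp]
        · rw [if_neg hk] at hv'
          exact h2 p' t' z' s' v' hv'


-- every character str() produces for a nonnegative int is a decimal digit character
lemma pv_mem_toDigitsCore (f : Nat) : ∀ (n : Nat) (acc : List Char) (c : Char),
    c ∈ Nat.toDigitsCore 10 f n acc → c ∈ acc ∨ ∃ m : Nat, c = Nat.digitChar (m % 10) := by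
  induction f with
  | zero => intro n acc c h; exact Or.inl h
  | succ f ih =>
    intro n acc c h
    simp only [Nat.toDigitsCore] at h
    by_cases hd : n / 10 = 0
    · simp only [hd, if_true] at h
      rcases List.mem_cons.mp h with h | h
      · exact Or.inr ⟨n, h⟩
      · exact Or.inl h
    · simp only [hd, if_false] at h
      rcases ih (n / 10) (Nat.digitChar (n % 10) :: acc) c h with h | h
      · rcases List.mem_cons.mp h with h | h
        · exact Or.inr ⟨n, h⟩
        · exact Or.inl h
      · exact Or.inr h

lemma pv_digitChar_nonneg : ∀ k : Fin 10,
    0 ≤ ((PySem.Int.ofStr? (String.ofList [Nat.digitChar k])).getD 0) := by decide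

lemma pvDigs_nonneg (N : Int) (hN : 0 ≤ N) : ∀ d ∈ pvDigs N, 0 ≤ d := by
  intro d hd
  simp only [pvDigs, List.mem_map] at hd
  obtain ⟨c, hc, rfl⟩ := hd
  rw [PySem.Int.toList_toStr] at hc
  unfold PySem.Int.toChars at hc
  rw [if_neg (by omega)] at hc
  unfold Nat.toDigits at hc
  rcases pv_mem_toDigitsCore (N.toNat + 1) N.toNat [] c hc with h | ⟨m, rfl⟩
  · simp at h
  · exact pv_digitChar_nonneg ⟨m % 10, Nat.mod_lt _ (by norm_num)⟩

-- fold of a constant increment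
lemma pv_foldl_const (c : Int) (xs : List Int) : ∀ t0 : Int,
    xs.foldl (fun t _ => t + c) t0 = t0 + (xs.length : Int) * c := by
  induction xs with
  | nil => intro t0; simp
  | cons x xs ih => intro t0; simp only [List.foldl, ih, List.length_cons]; push_cast; ring

-- A's inner loop over the middle digits 1..limit-1 contributes a constant per digit
lemma pv_mid (L : Int) (hL1 : 1 ≤ L) (f : Int → Int → Int) (c : Int)
    (hf : ∀ t d, 1 ≤ d → d < L → f t d = t + c) :
    ∀ t0 : Int, (PySem.List.pyRange 1 L 1).foldl f t0 = t0 + (L - 1) * c := by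
  intro t0
  calc (PySem.List.pyRange 1 L 1).foldl f t0
      = (PySem.List.pyRange 1 L 1).foldl (fun t _ => t + c) t0 := by
        refine PySem.List.foldl_congr_mem _ _ _ _ ?_
        intro acc d hd
        rw [PySem.List.mem_pyRange_one] at hd
        exact hf acc d hd.1 hd.2
    _ = t0 + (L - 1) * c := by
        rw [pv_foldl_const, PySem.List.length_pyRange_one]
        have h : (((L : Int) - 1).toNat : Int) = L - 1 := by omega
        rw [h]

lemma pv_split (L : Int) (hL1 : 1 ≤ L) :
    PySem.List.pyRange 0 (L + 1) 1 = 0 :: (PySem.List.pyRange 1 L 1 ++ [L]) := by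
  rw [PySem.List.pyRange_one_cons (by omega : (0:Int) < L + 1)]
  norm_num
  rw [PySem.List.pyRange_one_append 1 L (L + 1) (by omega) (by omega),
    PySem.List.pyRange_one_singleton]

-- the nine characterisations of A's dp on a one-digit-longer list
lemma pv_free_a (rest : List Int) (L : Int) : pvDp (L :: rest) false false true
    = pvDp rest false true true + 9 * pvDp rest false false true := by
  have hrange10 : PySem.List.pyRange 0 10 1 = [0,1,2,3,4,5,6,7,8,9] := by decide
  simp [pvDp]; rw [hrange10]; simp [List.foldl]; ring

lemma pv_free_b (rest : List Int) (L : Int) :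
    pvDp (L :: rest) false true true = 9 * pvDp rest false false true := by
  have hrange10 : PySem.List.pyRange 0 10 1 = [0,1,2,3,4,5,6,7,8,9] := by decide
  simp [pvDp]; rw [hrange10]; simp [List.foldl]; ring

lemma pv_free_u (rest : List Int) (L : Int) : pvDp (L :: rest) false false false
    = pvDp rest false false false + 9 * pvDp rest false false true := by
  have hrange10 : PySem.List.pyRange 0 10 1 = [0,1,2,3,4,5,6,7,8,9] := by decide
  simp [pvDp]; rw [hrange10]; simp [List.foldl]; ring

lemma pv_tight_ff_zero (rest : List Int) :
    pvDp ((0:Int) :: rest) true false false = pvDp rest true false false := by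
  have hr : PySem.List.pyRange 0 1 1 = [0] := by decide
  simp [pvDp]; rw [hr]; simp [List.foldl]

lemma pv_tight_ft_zero (rest : List Int) :
    pvDp ((0:Int) :: rest) true false true = pvDp rest true true true := by
  have hr : PySem.List.pyRange 0 1 1 = [0] := by decide
  simp [pvDp]; rw [hr]; simp [List.foldl]

lemma pv_tight_tt_zero (rest : List Int) :
    pvDp ((0:Int) :: rest) true true true = 0 := by
  have hr : PySem.List.pyRange 0 1 1 = [0] := by decide
  simp [pvDp]; rw [hr]; simp [List.foldl]

lemma pv_tight_ff_pos (rest : List Int) (L : Int) (hL1 : 1 ≤ L) : pvDp (L :: rest) true false false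
    = pvDp rest false false false + (L - 1) * pvDp rest false false true
      + pvDp rest true false true := by
  have h0L : ((0:Int) == L) = false := by simp; omega
  have hLne : (L == (0:Int)) = false := by simp; omega
  simp [pvDp]
  rw [pv_split L hL1, List.foldl_cons, List.foldl_append,
    pv_mid L hL1 _ (pvDp rest false false true)
      (by intro t d h1 h2
          have hd0 : (d == (0:Int)) = false := by simp; omega
          have hdL : (d == L) = false := by simp; omega
          simp [bne, hd0, hdL])]
  simp [bne, List.foldl, h0L, hLne]

lemma pv_tight_ft_pos (rest : List Int) (L : Int) (hL1 : 1 ≤ L) : pvDp (L :: rest) true false true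
    = pvDp rest false true true + (L - 1) * pvDp rest false false true
      + pvDp rest true false true := by
  have h0L : ((0:Int) == L) = false := by simp; omega
  have hLne : (L == (0:Int)) = false := by simp; omega
  simp [pvDp]
  rw [pv_split L hL1, List.foldl_cons, List.foldl_append,
    pv_mid L hL1 _ (pvDp rest false false true)
      (by intro t d h1 h2
          have hd0 : (d == (0:Int)) = false := by simp; omega
          have hdL : (d == L) = false := by simp; omega
          simp [hd0, hdL])]
  simp [List.foldl, h0L, hLne]

lemma pv_tight_tt_pos (rest : List Int) (L : Int) (hL1 : 1 ≤ L) : pvDp (L :: rest) true true true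
    = (L - 1) * pvDp rest false false true + pvDp rest true false true := by
  have hLne : (L == (0:Int)) = false := by simp; omega
  have hLne' : ¬ (L = 0) := by omega
  simp [pvDp]
  rw [pv_split L hL1, List.foldl_cons, List.foldl_append,
    pv_mid L hL1 _ (pvDp rest false false true)
      (by intro t d h1 h2
          have hd0 : (d == (0:Int)) = false := by simp; omega
          have hd0' : ¬ (d = 0) := by omega
          have hdL : (d == L) = false := by simp; omega
          simp [hd0, hd0', hdL])]
  simp [List.foldl, hLne, hLne']

-- one step of B's fold = extending the digit list on the left in A's dp
lemma pv_step_eq (rest : List Int) (L : Int) (hL : 0 ≤ L) :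
    pvStep (pvDp rest false false true, pvDp rest false true true, pvDp rest false false false,
            pvDp rest true false false, pvDp rest true false true, pvDp rest true true true) L
    = (pvDp (L :: rest) false false true, pvDp (L :: rest) false true true,
       pvDp (L :: rest) false false false, pvDp (L :: rest) true false false,
       pvDp (L :: rest) true false true, pvDp (L :: rest) true true true) := by
  by_cases h0 : L = 0
  · subst h0
    simp [pvStep, pv_free_a, pv_free_b, pv_free_u, pv_tight_ff_zero, pv_tight_ft_zero,
      pv_tight_tt_zero]
  · have hL1 : 1 ≤ L := by omega
    have hLne : (L == (0:Int)) = false := by simp; omega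
    have hmax : max (L - 1) 0 = L - 1 := by omega
    simp only [pvStep, hmax, hLne, if_pos hL1, Bool.false_eq_true, if_false,
      pv_free_a rest L, pv_free_b rest L, pv_free_u rest L,
      pv_tight_ff_pos rest L hL1, pv_tight_ft_pos rest L hL1, pv_tight_tt_pos rest L hL1]

-- B's fold over the reversed digits computes exactly A's dp values on the whole list
lemma pv_fold_eq (ds : List Int) (hds : ∀ d ∈ ds, 0 ≤ d) :
    ds.reverse.foldl pvStep (1, 1, 1, 1, 1, 1)
    = (pvDp ds false false true, pvDp ds false true true, pvDp ds false false false,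
       pvDp ds true false false, pvDp ds true false true, pvDp ds true true true) := by
  induction ds with
  | nil => simp [pvDp]
  | cons L ds ih =>
    have hL : 0 ≤ L := hds L (List.mem_cons_self ..)
    have ih' := ih (fun d hd => hds d (List.mem_cons_of_mem _ hd))
    rw [List.reverse_cons, List.foldl_append, ih', List.foldl_cons, List.foldl_nil,
      pv_step_eq ds L hL]

-- ===== VERDICT (by name: the statement is the Claim_ definition above) =====
theorem count_no_adjacent_zeros_spec : Claim_equal_count_no_adjacent_zeros := by
  intro N _ hPre
  unfold Spec_count_no_adjacent_zeros count_no_adjacent_zeros count_no_adjacent_zeros_alt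
  have hvalid : pvValid (pvDigs N) PySem.Dict.empty := by
    intro p t z s v hv
    rw [PySem.Dict.get?_empty] at hv
    exact absurd hv (by simp)
  have hmemo := pv_dpM_eq (pvDigs N) (pvDigs N) 0 true false false PySem.Dict.empty
    List.drop_zero.symm hvalid
  rw [hmemo.1]
  change pvDp (pvDigs N) true false false
      = ((pvDigs N).reverse.foldl pvStep (1, 1, 1, 1, 1, 1)).2.2.2.1
  rw [pv_fold_eq (pvDigs N) (pvDigs_nonneg N hPre)]
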